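-- pv_equiv track=rewrite | github.com/pemacy/Launch_School | Coursework/Python/Py110/lesson_1/sort_by_most_adjacent.py | sort_consonants
-- ===== SOURCE A (Python) =====
-- def sort_consonants(lst):
--     consonant_count_dict = {}
--     for str_ in lst:
--         str_consonant_count = count_consonants(str_)
--         consonant_count_dict.setdefault(str_consonant_count, [])
--         consonant_count_dict[str_consonant_count].append(str_)
--
--     result = concat_dict_values(consonant_count_dict)
--     return result
--
-- def count_consonants(str_):
--     lowercase = 'bcdfghjklmnpqrstvwxyz'
--     uppercase = 'bcdfghjklmnpqrstvwxyz'.upper()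
--     all_consonants = lowercase + uppercase
--
--     total_count = 0
--     count = 0
--     for c in str_:
--         if c.isspace():
--             continue
--         elif c in all_consonants:
--             count += 1
--         else:
--             if count > total_count:
--                 total_count = count
--             count = 0
--
--     if count > total_count:
--         total_count = count
--     return total_count
--
-- def concat_dict_values(d):
--     descending_keys = sorted(list(d.keys()), reverse=True)
--     result = []
--     for key in descending_keys:
--         result += d[key]
--     return result
-- ===== SOURCE B (Python) =====
-- CONSONANTS = 'bcdfghjklmnpqrstvwxyzBCDFGHJKLMNPQRSTVWXYZ'
--
-- def longest_run(s):
--     best = run = 0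
--     for ch in (c for c in s if not c.isspace()):
--         if ch in CONSONANTS:
--             run += 1
--             if run > best:
--                 best = run
--         else:
--             run = 0
--     return best
--
-- def sort_consonants(lst):
--     return sorted(lst, key=lambda s: -longest_run(s))
-- ===== Notes on version B (the rewrite author's own statement) =====
-- stated objective: idiomatic
-- what changed: Drops the dict bucketing, the descending key sort and the concat helper for a single stable ascending sort on the negated run length, with the run counter rewritten as a whitespace-filtering pass that tracks the running maximum inline instead of flushing it at run boundaries.
import Mathlib
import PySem

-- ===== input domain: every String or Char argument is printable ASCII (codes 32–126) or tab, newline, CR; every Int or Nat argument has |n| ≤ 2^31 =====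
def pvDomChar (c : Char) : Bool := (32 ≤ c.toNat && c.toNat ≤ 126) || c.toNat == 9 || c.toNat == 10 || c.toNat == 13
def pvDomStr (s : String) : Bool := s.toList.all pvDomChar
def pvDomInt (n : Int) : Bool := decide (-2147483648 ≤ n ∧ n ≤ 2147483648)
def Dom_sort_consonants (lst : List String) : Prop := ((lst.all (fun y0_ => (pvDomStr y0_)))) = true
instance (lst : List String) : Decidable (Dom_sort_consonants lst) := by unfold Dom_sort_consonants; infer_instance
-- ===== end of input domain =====

-- B replaces A's dict bucketing + descending key sort + concatenation by a single stable
-- ascending sort on the negated run length, with the run counter rewritten as a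
-- whitespace-filtering pass tracking the maximum inline (idiomatic, not claimed faster).

-- ===== PORT A =====
def pvLowercase : List Char := "bcdfghjklmnpqrstvwxyz".toList

def pvAllConsonants : List Char := pvLowercase ++ PySem.Chars.upper pvLowercase

def count_consonants (str_ : String) : Int :=
  let st := str_.toList.foldl (fun st c =>
    if PySem.Chars.isspace c then st
    else if pvAllConsonants.contains c then (st.1, st.2 + 1)
    else (if st.2 > st.1 then st.2 else st.1, 0)) ((0 : Int), (0 : Int))
  if st.2 > st.1 then st.2 else st.1

def sort_consonants (lst : List String) : List String :=
  let d := lst.foldl (fun d str_ =>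
      let cnt := count_consonants str_
      let d := d.setdefault cnt ([] : List String)
      d.insert cnt (d.getD cnt [] ++ [str_]))
    (PySem.Dict.empty)
  -- concat_dict_values: Python's `d[key]` ported as getD [] — exact here, every iterated key is a key of d
  let descending_keys := PySem.List.sorted d.keys (fun k => k) true
  descending_keys.foldl (fun result key => result ++ d.getD key []) []

-- ===== PORT B =====
def pvConsonants : List Char := "bcdfghjklmnpqrstvwxyzBCDFGHJKLMNPQRSTVWXYZ".toList

def longest_run (s : String) : Int :=
  let st := (s.toList.filter (fun c => !PySem.Chars.isspace c)).foldl
    (fun st ch =>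
      if pvConsonants.contains ch then ((if st.2 + 1 > st.1 then st.2 + 1 else st.1), st.2 + 1)
      else (st.1, 0)) ((0 : Int), (0 : Int))
  st.1

def sort_consonants_alt (lst : List String) : List String :=
  PySem.List.sorted lst (fun s => -(longest_run s)) false

-- ===== PRECONDITION & SPEC =====
def Spec_sort_consonants (lst : List String) (out : List String) : Prop := out = sort_consonants_alt lst
instance (lst : List String) (out : List String) : Decidable (Spec_sort_consonants lst out) := by unfold Spec_sort_consonants; infer_instance

-- ===== CLAIM (what is proved, stated in full; the proofs are below) =====
def Claim_equal_sort_consonants : Prop := ∀ (lst : List String), Dom_sort_consonants lst → Spec_sort_consonants lst (sort_consonants lst)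

-- ===== LEMMAS AND PROOFS =====

-- the two consonant alphabets are the same list of characters
theorem pv_cons_eq : pvConsonants = pvAllConsonants := by decide

-- A skips spaces inside the loop; this equals folding over the whitespace-filtered list
theorem pv_skip_eq_filter (l : List Char) (st : Int × Int) :
    l.foldl (fun st c =>
        if PySem.Chars.isspace c then st
        else if pvAllConsonants.contains c then (st.1, st.2 + 1)
        else (if st.2 > st.1 then st.2 else st.1, 0)) st
      = (l.filter (fun c => !PySem.Chars.isspace c)).foldl (fun st c =>
          if pvAllConsonants.contains c then (st.1, st.2 + 1)
          else (if st.2 > st.1 then st.2 else st.1, 0)) st := by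
  induction l generalizing st with
  | nil => rfl
  | cons c t ih =>
    by_cases h : PySem.Chars.isspace c = true
    · simp only [List.foldl_cons]
      rw [if_pos h, List.filter_cons_of_neg (by simp [h])]
      exact ih st
    · simp only [List.foldl_cons]
      rw [if_neg h, List.filter_cons_of_pos (by simp [h])]
      simp only [List.foldl_cons]
      exact ih _

-- invariant: A carries (flushed-max, current-run), B carries (overall-max, current-run)
theorem pv_run_invariant (l : List Char) : ∀ (t c b : Int), 0 ≤ t → 0 ≤ c → b = max t c →
    (fun p => if p.2 > p.1 then p.2 else p.1)
      (l.foldl (fun st ch =>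
          if pvAllConsonants.contains ch then (st.1, st.2 + 1)
          else (if st.2 > st.1 then st.2 else st.1, 0)) (t, c))
      = (l.foldl (fun st ch =>
          if pvConsonants.contains ch then ((if st.2 + 1 > st.1 then st.2 + 1 else st.1), st.2 + 1)
          else (st.1, 0)) (b, c)).1 := by
  induction l with
  | nil =>
    intro t c b _ _ hb
    simp only [List.foldl_nil]
    by_cases h : c > t <;> simp [h] <;> omega
  | cons ch tl ih =>
    intro t c b ht hc hb
    have hcc : pvAllConsonants.contains ch = pvConsonants.contains ch := by rw [pv_cons_eq]
    by_cases h : pvConsonants.contains ch = true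
    · simp only [List.foldl_cons]
      rw [if_pos (hcc.trans h), if_pos h]
      exact ih t (c + 1) _ ht (by omega) (by
        by_cases h2 : c + 1 > b <;> simp [h2] <;> omega)
    · simp only [List.foldl_cons]
      rw [if_neg (fun hh => h (hcc.symm.trans hh)), if_neg h]
      exact ih _ 0 b (by omega) le_rfl (by
        by_cases h2 : c > t <;> simp [h2] <;> omega)

-- the two run counters agree
theorem pv_count_eq : count_consonants = longest_run := by
  funext s
  unfold count_consonants longest_run
  rw [pv_skip_eq_filter]
  have := pv_run_invariant (s.toList.filter (fun c => !PySem.Chars.isspace c)) 0 0 0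
    le_rfl le_rfl (by omega)
  simpa using this

-- stable ascending sort by the negated key = stable descending sort by the key
theorem pv_neg_key_sorted (lst : List String) (c : String → Int) :
    PySem.List.sorted lst (fun s => -(c s)) false = PySem.List.sorted lst c true := by
  rw [PySem.List.sorted_eq_foldl_insertBy, PySem.List.sorted_rev_eq_foldl_insertBy]
  have : (fun (a b : String) => decide (-(c a) < -(c b))) = fun a b => decide (c b < c a) := by
    funext a b
    simp
  rw [this]

-- insertBy places x in front when it beats every element
theorem pv_insertBy_all {α : Type} (bef : α → α → Bool) (x : α) (ys : List α)
    (h : ∀ y ∈ ys, bef x y = true) :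
    PySem.List.insertBy bef x ys = x :: ys := by
  cases ys with
  | nil => simp [PySem.List.insertBy]
  | cons y t => simp [PySem.List.insertBy, h y (by simp)]

-- insertBy skips a prefix it does not beat
theorem pv_insertBy_append {α : Type} (bef : α → α → Bool) (x : α) (as bs : List α)
    (h : ∀ y ∈ as, bef x y = false) :
    PySem.List.insertBy bef x (as ++ bs) = as ++ PySem.List.insertBy bef x bs := by
  induction as with
  | nil => simp
  | cons a t ih =>
    have ha : bef x a = false := h a (by simp)
    simp [PySem.List.insertBy, ha]
    exact ih (fun y hy => h y (by simp [hy]))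

-- in a strictly descending key list with k ∉ keys, everything past the > k prefix is < k
theorem pv_dropWhile_lt (k : Int) (K : List Int)
    (hK : K.Pairwise (fun a b => b < a)) (hk : k ∉ K) :
    ∀ y ∈ K.dropWhile (fun j => decide (k < j)), y < k := by
  induction K with
  | nil => simp
  | cons k0 K' ih =>
    rcases List.pairwise_cons.mp hK with ⟨hhead, htail⟩
    by_cases h : k < k0
    · rw [List.dropWhile_cons_of_pos (by simpa using h)]
      exact ih htail (fun hc => hk (by simp [hc]))
    · rw [List.dropWhile_cons_of_neg (by simpa using h)]
      intro y hy
      have hk0 : k0 < k := lt_of_le_of_ne (not_lt.mp h) (fun he => hk (by simp [he]))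
      rcases List.mem_cons.mp hy with rfl | hy'
      · exact hk0
      · exact lt_trans (hhead y hy') hk0

-- inserting x whose key already occurs: x lands at the end of its bucket
theorem pv_insert_mem (c : String → Int) (x : String) (K : List Int) (F : Int → List String)
    (hK : K.Pairwise (fun a b => b < a)) (hF : ∀ k ∈ K, ∀ s ∈ F k, c s = k)
    (hk : c x ∈ K) :
    PySem.List.insertBy (fun a b => decide (c b < c a)) x (K.flatMap F)
      = K.flatMap (fun j => F j ++ if c x == j then [x] else []) := by
  induction K with
  | nil => simp at hk
  | cons k0 K' ih =>
    rcases List.pairwise_cons.mp hK with ⟨hhead, htail⟩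
    by_cases hek : c x = k0
    · have h1 : ∀ y ∈ F k0, (decide (c y < c x) : Bool) = false := by
        intro y hy
        have := hF k0 (by simp) y hy
        simp [this, hek]
      rw [List.flatMap_cons, pv_insertBy_append _ _ _ _ h1, pv_insertBy_all]
      · have hcongr : K'.flatMap (fun j => F j ++ if c x == j then [x] else []) = K'.flatMap F := by
          apply List.flatMap_congr
          intro j hj
          have : c x ≠ j := by
            have := hhead j hj
            omega
          simp [this]
        rw [List.flatMap_cons, hcongr]
        simp [hek]
      · intro y hy
        rcases List.mem_flatMap.mp hy with ⟨j, hj, hyj⟩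
        have hcy : c y = j := hF j (by simp [hj]) y hyj
        have : j < k0 := hhead j hj
        simp [hcy, hek]
        omega
    · have hk' : c x ∈ K' := by
        rcases List.mem_cons.mp hk with h | h
        · exact absurd h hek
        · exact h
      have hlt : c x < k0 := hhead _ hk'
      have h1 : ∀ y ∈ F k0, (decide (c y < c x) : Bool) = false := by
        intro y hy
        have := hF k0 (by simp) y hy
        simp [this]
        omega
      rw [List.flatMap_cons, pv_insertBy_append _ _ _ _ h1,
        ih htail (fun k hkK => hF k (by simp [hkK])) hk', List.flatMap_cons]
      have : (c x == k0) = false := by simp [hek]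
      simp [this]

-- inserting x whose key is new: x lands between the > k and < k buckets
theorem pv_insert_not_mem (c : String → Int) (x : String) (K : List Int) (F : Int → List String)
    (hK : K.Pairwise (fun a b => b < a)) (hF : ∀ k ∈ K, ∀ s ∈ F k, c s = k)
    (hk : c x ∉ K) :
    PySem.List.insertBy (fun a b => decide (c b < c a)) x (K.flatMap F)
      = (K.takeWhile (fun j => decide (c x < j))).flatMap F
        ++ x :: (K.dropWhile (fun j => decide (c x < j))).flatMap F := by
  induction K with
  | nil => simp [PySem.List.insertBy]
  | cons k0 K' ih =>
    rcases List.pairwise_cons.mp hK with ⟨hhead, htail⟩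
    by_cases h : c x < k0
    · have h1 : ∀ y ∈ F k0, (decide (c y < c x) : Bool) = false := by
        intro y hy
        have := hF k0 (by simp) y hy
        simp [this]
        omega
      rw [List.flatMap_cons, pv_insertBy_append _ _ _ _ h1,
        ih htail (fun k hkK => hF k (by simp [hkK])) (fun hc => hk (by simp [hc])),
        List.takeWhile_cons_of_pos (by simpa using h),
        List.dropWhile_cons_of_pos (by simpa using h), List.flatMap_cons]
      simp
    · have hk0 : k0 < c x := lt_of_le_of_ne (not_lt.mp h) (fun he => hk (by simp [he.symm]))
      rw [List.takeWhile_cons_of_neg (by simpa using h),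
        List.dropWhile_cons_of_neg (by simpa using h)]
      rw [pv_insertBy_all]
      · simp
      · intro y hy
        rcases List.mem_flatMap.mp hy with ⟨j, hj, hyj⟩
        have hcy : c y = j := hF j hj y hyj
        have hj_le : j ≤ k0 := by
          rcases List.mem_cons.mp hj with rfl | hj'
          · exact le_refl _
          · exact le_of_lt (hhead j hj')
        simp [hcy]
        omega

-- strict descending order of the distinct-key sort
theorem pv_keys_pairwise (xs : List Int) :
    (PySem.List.sorted (PySem.Set.ofList xs) (fun k => k) true).Pairwise (fun a b => b < a) := by
  have hge := PySem.List.sorted_pairwise_rev (PySem.Set.ofList xs) (fun k => k)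
  have hnd : (PySem.List.sorted (PySem.Set.ofList xs) (fun k => k) true).Nodup :=
    (PySem.List.sorted_perm (PySem.Set.ofList xs) (fun k => k) true).symm.nodup
      (PySem.Set.nodup_ofList xs)
  have := List.Pairwise.and hge hnd
  exact this.imp (fun {a b} hab => lt_of_le_of_ne hab.1 (Ne.symm hab.2))

-- THE stability characterisation: sorted(lst, key=c, reverse=True) is the concatenation,
-- over the distinct keys in descending order, of the key's original-order buckets.
theorem pv_sorted_rev_eq_groups (c : String → Int) (lst : List String) :
    PySem.List.sorted lst c true =
      (PySem.List.sorted (PySem.Set.ofList (lst.map c)) (fun k => k) true).flatMap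
        (fun k => lst.filter (fun s => c s == k)) := by
  induction lst using List.reverseRecOn with
  | nil =>
    have h1 : PySem.List.sorted ([] : List String) c true = [] := rfl
    rw [h1]
    simp
  | append_singleton l x ih =>
    have hstep : PySem.List.sorted (l ++ [x]) c true
        = PySem.List.insertBy (fun a b => decide (c b < c a)) x (PySem.List.sorted l c true) := by
      rw [PySem.List.sorted_rev_eq_foldl_insertBy, List.foldl_append, List.foldl_cons,
        List.foldl_nil, ← PySem.List.sorted_rev_eq_foldl_insertBy]
    set K := PySem.List.sorted (PySem.Set.ofList (l.map c)) (fun k => k) true with hKdef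
    have hKpw : K.Pairwise (fun a b => b < a) := pv_keys_pairwise (l.map c)
    have hKmem : ∀ j, j ∈ K ↔ j ∈ l.map c := by
      intro j
      rw [hKdef, PySem.List.mem_sorted, PySem.Set.mem_ofList]
    have hF : ∀ k ∈ K, ∀ s ∈ l.filter (fun s => c s == k), c s = k := by
      intro k _ s hs
      have := List.of_mem_filter hs
      simpa using this
    have hfilter : ∀ (j : Int), (l ++ [x]).filter (fun s => c s == j)
        = l.filter (fun s => c s == j) ++ if c x == j then [x] else [] := by
      intro j
      rw [List.filter_append]
      congr 1
      by_cases h : (c x == j) = true <;> simp [List.filter, h]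
    rw [hstep, ih]
    by_cases hmem : c x ∈ l.map c
    · -- key already present: same key list, x appended to its bucket
      have hkeys : PySem.Set.ofList ((l ++ [x]).map c) = PySem.Set.ofList (l.map c) := by
        rw [List.map_append, List.map_cons, List.map_nil, PySem.Set.ofList_append_singleton,
          PySem.Set.add_of_mem (by simpa using (PySem.Set.mem_ofList (l.map c) (c x)).mpr hmem)]
      rw [pv_insert_mem c x K _ hKpw hF ((hKmem _).mpr hmem), hkeys]
      apply List.flatMap_congr
      intro j _
      rw [hfilter j]
    · -- new key: it is spliced between the larger and the smaller keys
      have hkK : c x ∉ K := fun h => hmem ((hKmem _).mp h)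
      set T1 := K.takeWhile (fun j => decide (c x < j)) with hT1
      set T2 := K.dropWhile (fun j => decide (c x < j)) with hT2
      have hsplit : T1 ++ T2 = K := List.takeWhile_append_dropWhile
      have hkeys : PySem.List.sorted (PySem.Set.ofList ((l ++ [x]).map c)) (fun k => k) true
          = T1 ++ c x :: T2 := by
        rw [List.map_append, List.map_cons, List.map_nil, PySem.Set.ofList_append_singleton,
          PySem.Set.add_of_not_mem (by
            intro h
            exact hmem ((PySem.Set.mem_ofList (l.map c) (c x)).mp h))]
        apply PySem.List.sorted_rev_eq_of_perm_of_pairwise_gt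
        · have p1 : (T1 ++ c x :: T2).Perm (c x :: K) := by
            rw [← hsplit]
            exact List.perm_middle
          have p2 : (c x :: K).Perm (c x :: PySem.Set.ofList (l.map c)) :=
            List.Perm.cons _ (PySem.List.sorted_perm _ _ _)
          have p3 : (c x :: PySem.Set.ofList (l.map c)).Perm
              (PySem.Set.ofList (l.map c) ++ [c x]) := (List.perm_append_singleton _ _).symm
          exact (p1.trans p2).trans p3
        · have hT1pw : T1.Pairwise (fun a b => b < a) := hKpw.sublist (List.takeWhile_sublist _)
          have hT2pw : T2.Pairwise (fun a b => b < a) := hKpw.sublist (List.dropWhile_sublist _)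
          have hT1gt : ∀ a ∈ T1, c x < a := by
            intro a ha
            simpa using List.mem_takeWhile_imp ha
          have hT2lt : ∀ a ∈ T2, a < c x := pv_dropWhile_lt (c x) K hKpw hkK
          rw [List.pairwise_append]
          refine ⟨hT1pw, List.pairwise_cons.mpr ⟨hT2lt, hT2pw⟩, ?_⟩
          intro a ha b hb
          rcases List.mem_cons.mp hb with rfl | hb'
          · exact hT1gt a ha
          · exact lt_trans (hT2lt b hb') (hT1gt a ha)
      rw [pv_insert_not_mem c x K _ hKpw hF hkK, hkeys]
      have hbucket : ∀ j ∈ K, (l ++ [x]).filter (fun s => c s == j) = l.filter (fun s => c s == j) := by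
        intro j hj
        rw [hfilter j]
        have : c x ≠ j := fun h => hkK (h ▸ hj)
        simp [this]
      have hnew : (l ++ [x]).filter (fun s => c s == c x) = [x] := by
        rw [hfilter (c x)]
        have : l.filter (fun s => c s == c x) = [] := by
          rw [List.filter_eq_nil_iff]
          intro s hs
          simp
          intro h
          exact hmem (h ▸ List.mem_map_of_mem hs)
        simp [this]
      rw [List.flatMap_append, List.flatMap_cons, hnew]
      have h1 : T1.flatMap (fun k => (l ++ [x]).filter (fun s => c s == k))
          = T1.flatMap (fun k => l.filter (fun s => c s == k)) :=
        List.flatMap_congr (fun j hj => hbucket j ((hsplit ▸ List.mem_append_left T2 hj)))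
      have h2 : T2.flatMap (fun k => (l ++ [x]).filter (fun s => c s == k))
          = T2.flatMap (fun k => l.filter (fun s => c s == k)) :=
        List.flatMap_congr (fun j hj => hbucket j ((hsplit ▸ List.mem_append_right T1 hj)))
      rw [h1, h2, ← hT1, ← hT2]
      simp

-- A's loop body (setdefault then append-by-reassignment) IS Dict.modify
theorem pv_step_eq_modify (d : PySem.Dict Int (List String)) (k : Int) (s : String) :
    (d.setdefault k ([] : List String)).insert k
        ((d.setdefault k ([] : List String)).getD k [] ++ [s])
      = d.modify k [] (· ++ [s]) := by
  rw [PySem.Dict.getD_setdefault_self]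
  show _ = d.insert k (d.getD k [] ++ [s])
  by_cases hc : d.contains k = true
  · rw [PySem.Dict.setdefault_of_contains _ _ hc]
  · rw [PySem.Dict.setdefault_of_not_contains _ _ (by simpa using hc), PySem.Dict.insert_insert_self]

-- A's whole body equals the grouped flatMap form
theorem pv_portA_eq_groups (lst : List String) :
    sort_consonants lst =
      (PySem.List.sorted (PySem.Set.ofList (lst.map count_consonants)) (fun k => k) true).flatMap
        (fun k => lst.filter (fun s => count_consonants s == k)) := by
  have hstep : (fun (d : PySem.Dict Int (List String)) (str_ : String) =>
      let cnt := count_consonants str_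
      let d := d.setdefault cnt ([] : List String)
      d.insert cnt (d.getD cnt [] ++ [str_]))
      = fun d s => d.modify (count_consonants s) [] (fun v => v ++ [s]) := by
    funext d s
    exact pv_step_eq_modify d (count_consonants s) s
  unfold sort_consonants
  rw [hstep, PySem.List.foldl_append_eq_flatMap]
  have hkeys : (lst.foldl (fun d s => d.modify (count_consonants s) [] (fun v => v ++ [s]))
      PySem.Dict.empty).keys = PySem.Set.ofList (lst.map count_consonants) := by
    rw [PySem.Dict.keys_foldl_modify_key, PySem.Dict.keys_empty, PySem.Set.update_nil_left]
  have hpairs : lst.foldl (fun d s => d.modify (count_consonants s) [] (fun v => v ++ [s]))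
        PySem.Dict.empty
      = (lst.map (fun s => (count_consonants s, s))).foldl
          (fun d p => d.modify p.1 [] (fun v => v ++ [p.2])) PySem.Dict.empty := by
    exact (List.foldl_map (f := fun s => (count_consonants s, s))
      (g := fun (d : PySem.Dict Int (List String)) p => d.modify p.1 [] (fun v => v ++ [p.2]))
      (l := lst) (init := PySem.Dict.empty)).symm
  have hgetD : (fun k => (lst.foldl (fun d s => d.modify (count_consonants s) [] (fun v => v ++ [s]))
      PySem.Dict.empty).getD k []) = fun k => lst.filter (fun s => count_consonants s == k) := by
    funext k
    rw [hpairs, PySem.Dict.getD_foldl_modify_append, PySem.Dict.getD_empty]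
    simp [List.filter_map, List.map_map, Function.comp_def]
  rw [hkeys, hgetD]
  simp

-- ===== VERDICT (by name: the statement is the Claim_ definition above) =====
theorem sort_consonants_spec : Claim_equal_sort_consonants := by
  intro lst _
  unfold Spec_sort_consonants sort_consonants_alt
  rw [pv_neg_key_sorted, ← pv_count_eq, pv_portA_eq_groups, pv_sorted_rev_eq_groups]
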